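-- pv_equiv track=rewrite | github.com/Xouper/home | stepik/n25/n25_4/z2/2.py | kdel
-- ===== SOURCE A (Python) =====
-- def isprime(n):
--     d = 2
--     while d * d <= n:
--         if n % d == 0:
--             return False
--         d += 1
--     return True
--
-- def kdel(n):
--     d = 2
--     my_del = [0]
--     while d * d < n:
--         if n % d == 0:
--             if isprime(d) and isprime(n // d):
--                 my_del.append(d)
--                 my_del.append(n // d)
--         d += 1
--     return my_del
-- ===== SOURCE B (Python) =====
-- def kdel(n):
--     # Fully factor n by trial division, then decide from the factor list's shape.
--     factors = []
--     m = n
--     d = 2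
--     while d * d <= m:
--         if m % d == 0:
--             factors.append(d)
--             m //= d
--         else:
--             d += 1
--     if m > 1:
--         factors.append(m)
--     if len(factors) == 2 and factors[0] != factors[1]:
--         return [0] + factors
--     return [0]
-- ===== Notes on version B (the rewrite author's own statement) =====
-- stated objective: alternative
-- what changed: B computes the full prime factorization of n by divide-down trial division and returns [0]+factors exactly when the factor list has two distinct entries, instead of A's scan of every d below sqrt(n) with two trial-division primality tests per divisor found.
import Mathlib
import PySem

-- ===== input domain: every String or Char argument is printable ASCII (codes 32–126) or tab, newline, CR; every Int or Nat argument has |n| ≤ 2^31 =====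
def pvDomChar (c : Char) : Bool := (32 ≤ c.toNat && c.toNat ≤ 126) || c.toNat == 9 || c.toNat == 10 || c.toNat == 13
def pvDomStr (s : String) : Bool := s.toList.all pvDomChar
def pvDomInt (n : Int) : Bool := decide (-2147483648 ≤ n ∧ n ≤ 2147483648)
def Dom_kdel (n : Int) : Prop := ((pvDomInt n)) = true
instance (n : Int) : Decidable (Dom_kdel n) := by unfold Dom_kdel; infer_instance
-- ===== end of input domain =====

-- B replaces A's scan of every candidate d with d*d < n (with two trial-division primality
-- tests per divisor found) by one divide-down trial-division factorization of n, deciding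
-- the answer from the shape of the factor list (a different algorithm of similar cost).

-- termination helper for the loops below (cited by their decreasing_by)
theorem pv_le_mul_self (d : Int) : d ≤ d * d := by
  by_cases h : d ≤ 0
  · have h2 : 0 ≤ d * d := mul_self_nonneg d
    omega
  · nlinarith

-- ===== PORT A =====
-- 'while d*d <= n: if n % d == 0: return False; d += 1' then 'return True'
def isprimeGo (n d : Int) : Bool :=
  if d * d ≤ n then
    if PySem.Int.mod n d == 0 then false
    else isprimeGo n (d + 1)
  else true
termination_by (n + 1 - d).toNat
decreasing_by
  have h2 : d * d ≤ n := by assumption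
  have h1 : d ≤ n := le_trans (pv_le_mul_self d) h2
  omega

def isprime (n : Int) : Bool := isprimeGo n 2

-- 'while d*d < n: if n % d == 0: if isprime(d) and isprime(n//d): append d; append n//d; d += 1'
def kdelGo (n d : Int) (my_del : List Int) : List Int :=
  if d * d < n then
    let my_del' :=
      if PySem.Int.mod n d == 0 then
        if isprime d && isprime (PySem.Int.floordiv n d) then
          my_del ++ [d, PySem.Int.floordiv n d]
        else my_del
      else my_del
    kdelGo n (d + 1) my_del'
  else my_del
termination_by (n + 1 - d).toNat
decreasing_by
  have h2 : d * d < n := by assumption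
  have h1 : d ≤ n := le_trans (pv_le_mul_self d) (le_of_lt h2)
  omega

def kdel (n : Int) : List Int := kdelGo n 2 [0]

-- ===== PORT B =====
-- 'while d*d <= m: if m % d == 0: factors.append(d); m //= d; else: d += 1' then
-- 'if m > 1: factors.append(m)'.  The 'd ≤ 1' guard only makes the recursion total
-- (division by d must shrink m); kdel_alt always starts it at d = 2.
def facGo (m d : Int) : List Int :=
  if d ≤ 1 then []
  else if d * d ≤ m then
    if PySem.Int.mod m d == 0 then d :: facGo (PySem.Int.floordiv m d) d
    else facGo m (d + 1)
  else if 1 < m then [m] else []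
termination_by (m.toNat, (m - d).toNat)
decreasing_by
  · have hd : ¬ d ≤ 1 := by assumption
    have hdm : d * d ≤ m := by assumption
    have hm : 0 < m := by nlinarith
    have h0 : 0 ≤ PySem.Int.floordiv m d :=
      (PySem.Int.le_floordiv_iff_mul_le (by omega)).mpr (by nlinarith)
    have h1 : PySem.Int.floordiv m d < m :=
      (PySem.Int.floordiv_lt_iff_lt_mul (by omega)).mpr (by nlinarith)
    exact Prod.Lex.left _ _ (by omega)
  · have hd : ¬ d ≤ 1 := by assumption
    have hdm : d * d ≤ m := by assumption
    have h1 : d < m := by nlinarith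
    exact Prod.Lex.right _ (by omega)

-- 'if len(factors) == 2 and factors[0] != factors[1]: return [0] + factors; return [0]'
def kdel_alt (n : Int) : List Int :=
  let factors := facGo n 2
  if factors.length == 2 && (PySem.List.pyGet? factors 0 != PySem.List.pyGet? factors 1) then
    [0] ++ factors
  else [0]

-- ===== PRECONDITION & SPEC =====
def Spec_kdel (n : Int) (out : List Int) : Prop := out = kdel_alt n
instance (n : Int) (out : List Int) : Decidable (Spec_kdel n out) := by unfold Spec_kdel; infer_instance

-- ===== CLAIM (what is proved, stated in full; the proofs are below) =====
def Claim_equal_kdel : Prop := ∀ (n : Int), Dom_kdel n → Spec_kdel n (kdel n)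

-- ===== LEMMAS AND PROOFS =====

-- The boolean condition under which A's loop body appends [d, n//d]
def appendCond (n d : Int) : Bool :=
  (PySem.Int.mod n d == 0) && (isprime d && isprime (PySem.Int.floordiv n d))

-- A's loop body, refactored through appendCond
theorem kdelGo_eq (n d : Int) (acc : List Int) :
    kdelGo n d acc =
      if d * d < n then
        kdelGo n (d + 1)
          (if appendCond n d then acc ++ [d, PySem.Int.floordiv n d] else acc)
      else acc := by
  rw [kdelGo]
  unfold appendCond
  by_cases h1 : PySem.Int.mod n d == 0 <;>
    by_cases h2 : isprime d && isprime (PySem.Int.floordiv n d) <;>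
      simp [h1, h2]

-- M1: if no candidate from d on satisfies the append condition, the loop returns acc
theorem kdelGo_none (n d : Int) (acc : List Int)
    (h : ∀ k, d ≤ k → k * k < n → appendCond n k = false) :
    kdelGo n d acc = acc := by
  rw [kdelGo_eq]
  split
  · rename_i hlt
    rw [h d le_rfl hlt, if_neg (by decide)]
    exact kdelGo_none n (d + 1) acc (fun k hk => h k (by omega))
  · rfl
termination_by (n + 1 - d).toNat
decreasing_by
  have h1 : d ≤ n := le_trans (pv_le_mul_self d) (by omega)
  omega

-- M2: if exactly one candidate p (from d on) satisfies it, the loop appends [p, n//p]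
theorem kdelGo_one (n d p : Int) (acc : List Int) (hd2 : 2 ≤ d)
    (hdp : d ≤ p) (hp : p * p < n) (hc : appendCond n p = true)
    (h : ∀ k, d ≤ k → k * k < n → k ≠ p → appendCond n k = false) :
    kdelGo n d acc = acc ++ [p, PySem.Int.floordiv n p] := by
  rw [kdelGo_eq]
  split
  · rename_i hlt
    by_cases hdp' : d = p
    · subst hdp'
      rw [hc, if_pos rfl]
      exact kdelGo_none n (d + 1) _ (fun k hk hkn => h k (by omega) hkn (by omega))
    · rw [h d le_rfl hlt hdp', if_neg (by decide)]
      exact kdelGo_one n (d + 1) p acc (by omega) (by omega) hp hc (fun k hk => h k (by omega))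
  · rename_i hge
    exfalso
    have h2 : d * d ≤ p * p := by nlinarith
    omega
termination_by (n + 1 - d).toNat
decreasing_by
  have h1 : d ≤ n := le_trans (pv_le_mul_self d) (by omega)
  omega

-- isprime loop: true iff no trial divisor k ≥ d with k*k ≤ n divides n
theorem isprimeGo_iff (n d : Int) (hd : 1 ≤ d) :
    isprimeGo n d = true ↔ ∀ k : Int, d ≤ k → k * k ≤ n → ¬ k ∣ n := by
  rw [isprimeGo]
  split
  · rename_i hle
    by_cases h1 : PySem.Int.mod n d == 0
    · simp only [if_pos h1]
      constructor
      · intro h; exact absurd h (by decide)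
      · intro h
        exact absurd ((PySem.Int.mod_eq_zero_iff_dvd n d).mp (by simpa using h1))
          (h d le_rfl hle)
    · simp only [if_neg h1]
      rw [isprimeGo_iff n (d + 1) (by omega)]
      constructor
      · intro h k hk hkn
        rcases eq_or_lt_of_le hk with rfl | hk'
        · intro hdvd
          exact h1 (by simp [(PySem.Int.mod_eq_zero_iff_dvd n d).mpr hdvd])
        · exact h k (by omega) hkn
      · intro h k hk hkn
        exact h k (by omega) hkn
  · rename_i hgt
    simp only [true_iff]
    intro k hk hkn
    have hkd : d * d ≤ k * k := by nlinarith
    omega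
termination_by (n + 1 - d).toNat
decreasing_by
  have h1 : d ≤ n := le_trans (pv_le_mul_self d) (by assumption)
  omega

-- isprime agrees with Nat.Prime on integers ≥ 2
theorem isprime_iff (x : Int) (hx : 2 ≤ x) : isprime x = true ↔ Nat.Prime x.toNat := by
  rw [isprime, isprimeGo_iff x 2 (by omega), Nat.prime_def_le_sqrt]
  constructor
  · intro h
    refine ⟨by omega, fun m hm hms hdvd => ?_⟩
    have hmm : m * m ≤ x.toNat := Nat.le_sqrt.mp hms
    refine h (m : Int) (by exact_mod_cast hm) (by omega) ?_
    have h2 : (m : Int) ∣ ((x.toNat : Nat) : Int) := Int.natCast_dvd_natCast.mpr hdvd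
    rwa [Int.toNat_of_nonneg (by omega)] at h2
  · rintro ⟨-, h⟩ k hk hkk hdvd
    have hkk' : k.toNat * k.toNat ≤ x.toNat := by
      have h5 : ((k.toNat * k.toNat : Nat) : Int) ≤ ((x.toNat : Nat) : Int) := by
        rw [Nat.cast_mul, Int.toNat_of_nonneg (by omega : (0:Int) ≤ k),
          Int.toNat_of_nonneg (by omega : (0:Int) ≤ x)]
        exact hkk
      exact_mod_cast h5
    refine h k.toNat (by omega) (Nat.le_sqrt.mpr hkk') ?_
    have h2 : (k.toNat : Int) ∣ (x.toNat : Int) := by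
      rw [Int.toNat_of_nonneg (by omega : (0:Int) ≤ k), Int.toNat_of_nonneg (by omega : (0:Int) ≤ x)]
      exact hdvd
    exact_mod_cast h2

-- The mathematical content of appendCond on an in-range candidate
def condP (n d : Int) : Prop :=
  2 ≤ d ∧ d * d < n ∧ d ∣ n ∧ Nat.Prime d.toNat ∧ Nat.Prime (n / d).toNat

theorem cofactor_gt (n d : Int) (hd : 2 ≤ d) (hlt : d * d < n) (hdvd : d ∣ n) :
    d < n / d := by
  obtain ⟨t, rfl⟩ := hdvd
  have ht : d < t := by nlinarith
  rw [Int.mul_ediv_cancel_left t (by omega)]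
  exact ht

theorem appendCond_iff (n d : Int) (hd : 2 ≤ d) (hlt : d * d < n) :
    appendCond n d = true ↔ condP n d := by
  rw [appendCond, condP]
  simp only [Bool.and_eq_true, beq_iff_eq]
  rw [PySem.Int.mod_eq_zero_iff_dvd n d,
    PySem.Int.floordiv_eq_ediv_of_pos (by omega : (0:Int) < d)]
  constructor
  · rintro ⟨hdvd, hp1, hp2⟩
    have hq := cofactor_gt n d hd hlt hdvd
    exact ⟨hd, hlt, hdvd, (isprime_iff d hd).mp hp1, (isprime_iff (n / d) (by omega)).mp hp2⟩
  · rintro ⟨-, -, hdvd, hp1, hp2⟩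
    have hq := cofactor_gt n d hd hlt hdvd
    exact ⟨hdvd, (isprime_iff d hd).mpr hp1, (isprime_iff (n / d) (by omega)).mpr hp2⟩

-- product of the toNat image of a list of nonnegative ints
theorem pv_prod_map_toNat (l : List Int) (h : ∀ x ∈ l, 0 ≤ x) :
    ((l.map Int.toNat).prod : Int) = l.prod := by
  induction l with
  | nil => simp
  | cons a t ih =>
    simp only [List.map_cons, List.prod_cons]
    rw [Nat.cast_mul, Int.toNat_of_nonneg (h a (by simp)), ih (fun x hx => h x (by simp [hx]))]

-- B's factorization loop: full specification
theorem facGo_spec (m d : Int) (hd : 2 ≤ d) (hm : 1 ≤ m)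
    (hinv : ∀ k : Int, 2 ≤ k → k < d → ¬ k ∣ m) :
    (facGo m d).prod = m ∧ (∀ x ∈ facGo m d, d ≤ x ∧ Nat.Prime x.toNat) ∧
      (facGo m d).Pairwise (· ≤ ·) := by
  rw [facGo]
  split
  · omega
  split
  · rename_i hd1 hdm
    split
    · rename_i hmod
      have hdvd : d ∣ m := (PySem.Int.mod_eq_zero_iff_dvd m d).mp (by simpa using hmod)
      have hfd : PySem.Int.floordiv m d = m / d :=
        PySem.Int.floordiv_eq_ediv_of_pos (by omega : (0:Int) < d)
      have hdq : d ≤ m / d := (Int.le_ediv_iff_mul_le (by omega : (0:Int) < d)).mpr hdm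
      have hqdvd : m / d ∣ m := ⟨d, by rw [Int.ediv_mul_cancel hdvd]⟩
      have hdprime : Nat.Prime d.toNat := by
        rw [Nat.prime_def_lt]
        refine ⟨by omega, fun k hk hkdvd => ?_⟩
        by_contra h1
        have hk0 : k ≠ 0 := by
          rintro rfl
          rw [zero_dvd_iff] at hkdvd
          omega
        refine hinv (k : Int) (by omega) (by omega) (dvd_trans ?_ hdvd)
        have h3 : (k : Int) ∣ ((d.toNat : Nat) : Int) := Int.natCast_dvd_natCast.mpr hkdvd
        rwa [Int.toNat_of_nonneg (by omega)] at h3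
      rw [hfd]
      obtain ⟨ih1, ih2, ih3⟩ := facGo_spec (m / d) d hd (by omega)
        (fun k hk2 hkd hkdvd => hinv k hk2 hkd (dvd_trans hkdvd hqdvd))
      refine ⟨?_, ?_, ?_⟩
      · rw [List.prod_cons, ih1, Int.mul_ediv_cancel' hdvd]
      · intro x hx
        rcases List.mem_cons.mp hx with rfl | hx'
        · exact ⟨le_rfl, hdprime⟩
        · exact ih2 x hx'
      · exact List.pairwise_cons.mpr ⟨fun x hx => (ih2 x hx).1, ih3⟩
    · rename_i hmod
      have hnd : ¬ d ∣ m := fun hdvd =>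
        hmod (by simp [(PySem.Int.mod_eq_zero_iff_dvd m d).mpr hdvd])
      obtain ⟨i1, i2, i3⟩ := facGo_spec m (d + 1) (by omega) hm (fun k hk2 hkd hkdvd => by
        rcases eq_or_lt_of_le (by omega : k ≤ d) with rfl | hk'
        · exact hnd hkdvd
        · exact hinv k hk2 (by omega) hkdvd)
      exact ⟨i1, fun x hx => ⟨by have := (i2 x hx).1; omega, (i2 x hx).2⟩, i3⟩
  · rename_i hd1 hdm
    split
    · rename_i hm1
      have hdm' : d ≤ m := by
        by_contra hcon
        exact hinv m (by omega) (by omega) dvd_rfl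
      refine ⟨by simp, fun x hx => ?_, by simp⟩
      simp only [List.mem_singleton] at hx
      rw [hx]
      refine ⟨hdm', ?_⟩
      by_contra hnp
      have hk2 : 2 ≤ m.toNat.minFac := (Nat.minFac_prime (by omega)).two_le
      have hksq : m.toNat.minFac ^ 2 ≤ m.toNat := Nat.minFac_sq_le_self (by omega) hnp
      have hkdvd : m.toNat.minFac ∣ m.toNat := Nat.minFac_dvd _
      have hki : (m.toNat.minFac : Int) * (m.toNat.minFac : Int) ≤ m := by
        have h4 : ((m.toNat.minFac ^ 2 : Nat) : Int) ≤ ((m.toNat : Nat) : Int) := by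
          exact_mod_cast hksq
        rw [Int.toNat_of_nonneg (by omega)] at h4
        push_cast at h4
        nlinarith [h4]
      have hkd : (m.toNat.minFac : Int) < d := by
        nlinarith [hki, hdm, (by exact_mod_cast hk2 : (2:Int) ≤ (m.toNat.minFac : Int))]
      refine hinv (m.toNat.minFac : Int) (by exact_mod_cast hk2) hkd ?_
      have h2 : ((m.toNat.minFac : Nat) : Int) ∣ ((m.toNat : Nat) : Int) :=
        Int.natCast_dvd_natCast.mpr hkdvd
      rwa [Int.toNat_of_nonneg (by omega)] at h2
    · rename_i hm1
      have hm1' : m = 1 := by omega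
      subst hm1'
      simp
termination_by (m.toNat, (m - d).toNat)
decreasing_by
  · have hdm' : d * d ≤ m := by assumption
    have h1 : d < m := by nlinarith
    exact Prod.Lex.right _ (by omega)
  · have h0 : 0 ≤ m / d := by omega
    have h1 : m / d < m := by nlinarith [Int.mul_ediv_cancel' hdvd, hdq]
    exact Prod.Lex.left _ _ (by omega)

-- at most one integer satisfies condP n ·
theorem condP_unique (n a b : Int) (ha : condP n a) (hb : condP n b) : a = b := by
  obtain ⟨ha2, halt, hadvd, hap, haq⟩ := ha
  obtain ⟨hb2, hblt, hbdvd, hbp, hbq⟩ := hb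
  have hqa := cofactor_gt n a ha2 halt hadvd
  have hqb := cofactor_gt n b hb2 hblt hbdvd
  have hna : a * (n / a) = n := Int.mul_ediv_cancel' hadvd
  have hnb : b * (n / b) = n := Int.mul_ediv_cancel' hbdvd
  have hn0 : (0:Int) ≤ n := by nlinarith
  have hNa : a.toNat * (n / a).toNat = n.toNat := by
    have h4 : ((a.toNat * (n / a).toNat : Nat) : Int) = ((n.toNat : Nat) : Int) := by
      push_cast
      rw [Int.toNat_of_nonneg (by omega : (0:Int) ≤ a),
        Int.toNat_of_nonneg (by omega : (0:Int) ≤ n / a),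
        Int.toNat_of_nonneg hn0, hna]
    exact_mod_cast h4
  have hNb : b.toNat * (n / b).toNat = n.toNat := by
    have h4 : ((b.toNat * (n / b).toNat : Nat) : Int) = ((n.toNat : Nat) : Int) := by
      push_cast
      rw [Int.toNat_of_nonneg (by omega : (0:Int) ≤ b),
        Int.toNat_of_nonneg (by omega : (0:Int) ≤ n / b),
        Int.toNat_of_nonneg hn0, hnb]
    exact_mod_cast h4
  have hdvdA : a.toNat ∣ b.toNat * (n / b).toNat := by
    rw [hNb, ← hNa]
    exact Dvd.intro _ rfl
  rcases (Nat.Prime.dvd_mul hap).mp hdvdA with h | h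
  · have h5 : a.toNat = b.toNat := (Nat.prime_dvd_prime_iff_eq hap hbp).mp h
    omega
  · have hAQB : a.toNat = (n / b).toNat := (Nat.prime_dvd_prime_iff_eq hap hbq).mp h
    have h6 : a.toNat * (n / a).toNat = a.toNat * b.toNat := by
      rw [hNa, ← hNb, hAQB]
      ring
    have hQAB : (n / a).toNat = b.toNat := Nat.eq_of_mul_eq_mul_left (by omega) h6
    omega

-- if condP n d holds then B's factor list is exactly [d, n/d]
theorem facGo_of_condP (n d : Int) (hn : 2 ≤ n) (hd : condP n d) :
    facGo n 2 = [d, n / d] := by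
  obtain ⟨hd2, hdlt, hdvd, hdp, hqp⟩ := hd
  have hq := cofactor_gt n d hd2 hdlt hdvd
  have hnd : d * (n / d) = n := Int.mul_ediv_cancel' hdvd
  obtain ⟨hprod, hmem, hpair⟩ := facGo_spec n 2 le_rfl (by omega)
    (fun k hk2 hkd _ => by omega)
  have hnn : ∀ x ∈ facGo n 2, 0 ≤ x := fun x hx => by
    have := (hmem x hx).1
    omega
  have hprodN : ((facGo n 2).map Int.toNat).prod = n.toNat := by
    have h4 := pv_prod_map_toNat (facGo n 2) hnn
    rw [hprod] at h4
    omega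
  have perm1 : List.Perm ((facGo n 2).map Int.toNat) n.toNat.primeFactorsList :=
    Nat.primeFactorsList_unique hprodN (fun p hp => by
      obtain ⟨x, hx, rfl⟩ := List.mem_map.mp hp
      exact (hmem x hx).2)
  have hprod2 : ([d.toNat, (n / d).toNat] : List Nat).prod = n.toNat := by
    have h4 : ((d.toNat * (n / d).toNat : Nat) : Int) = ((n.toNat : Nat) : Int) := by
      push_cast
      rw [Int.toNat_of_nonneg (by omega : (0:Int) ≤ d),
        Int.toNat_of_nonneg (by omega : (0:Int) ≤ n / d),
        Int.toNat_of_nonneg (by omega : (0:Int) ≤ n), hnd]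
    simp only [List.prod_cons, List.prod_nil, mul_one]
    exact_mod_cast h4
  have perm2 : List.Perm ([d.toNat, (n / d).toNat] : List Nat) n.toNat.primeFactorsList :=
    Nat.primeFactorsList_unique hprod2 (fun p hp => by
      simp only [List.mem_cons, List.not_mem_nil, or_false] at hp
      rcases hp with rfl | rfl
      · exact hdp
      · exact hqp)
  have perm := perm1.trans perm2.symm
  have sorted1 : ((facGo n 2).map Int.toNat).Pairwise (· ≤ ·) :=
    List.Pairwise.map Int.toNat (fun a b hab => Int.toNat_le_toNat hab) hpair
  have sorted2 : ([d.toNat, (n / d).toNat] : List Nat).Pairwise (· ≤ ·) := by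
    simp [List.pairwise_cons]
    omega
  have heq : (facGo n 2).map Int.toNat = [d.toNat, (n / d).toNat] :=
    List.Perm.eq_of_pairwise' sorted1 sorted2 perm
  have hlen : (facGo n 2).length = 2 := by
    have h5 := congrArg List.length heq
    simpa using h5
  obtain ⟨x, y, hxy⟩ := List.length_eq_two.mp hlen
  have hx2 : 2 ≤ x := (hmem x (by simp [hxy])).1
  have hy2 : 2 ≤ y := (hmem y (by simp [hxy])).1
  rw [hxy] at heq
  simp only [List.map_cons, List.map_nil, List.cons.injEq, and_true] at heq
  obtain ⟨hxe, hye⟩ := heq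
  have hxd : x = d := by omega
  have hyq : y = n / d := by omega
  rw [hxy, hxd, hyq]

-- smallest-prime-factor facts packaged for the two main cases
theorem kdelAlt_of_condP (n d : Int) (hn : 2 ≤ n) (hd : condP n d) :
    kdel_alt n = [0, d, n / d] := by
  have hfac := facGo_of_condP n d hn hd
  have hq := cofactor_gt n d hd.1 hd.2.1 hd.2.2.1
  have hne : d ≠ n / d := by omega
  simp only [kdel_alt, hfac]
  rw [if_pos]
  · rfl
  · simp [PySem.List.pyGet?, PySem.List.pyIdx?, hne]

-- ===== VERDICT (by name: the statement is the Claim_ definition above) =====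
theorem kdel_spec : Claim_equal_kdel := by
  unfold Claim_equal_kdel
  intro n _
  unfold Spec_kdel
  by_cases hn2 : 2 ≤ n
  · by_cases hex : ∃ p, condP n p
    · obtain ⟨p, hp⟩ := hex
      have hp2 := hp.1
      have hplt := hp.2.1
      have hA : kdel n = [0] ++ [p, PySem.Int.floordiv n p] :=
        kdelGo_one n 2 p [0] le_rfl hp2 hplt ((appendCond_iff n p hp2 hplt).mpr hp)
          (fun k hk2 hkn hkp => by
            cases hb : appendCond n k with
            | false => rfl
            | true =>
              exact absurd (condP_unique n k p ((appendCond_iff n k hk2 hkn).mp hb) hp) hkp)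
      rw [hA, kdelAlt_of_condP n p hn2 hp,
        PySem.Int.floordiv_eq_ediv_of_pos (by omega : (0:Int) < p)]
      rfl
    · simp only [not_exists] at hex
      have hA : kdel n = [0] :=
        kdelGo_none n 2 [0] (fun k hk2 hkn => by
          cases hb : appendCond n k with
          | false => rfl
          | true => exact absurd ((appendCond_iff n k hk2 hkn).mp hb) (hex k))
      rw [hA, kdel_alt]
      obtain ⟨hprod, hmem, hpair⟩ := facGo_spec n 2 le_rfl (by omega)
        (fun k hk2 hkd _ => by omega)
      rw [if_neg]
      intro hcond
      simp only [Bool.and_eq_true, beq_iff_eq, bne_iff_ne, ne_eq] at hcond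
      obtain ⟨hlen, hne⟩ := hcond
      obtain ⟨x, y, hxy⟩ := List.length_eq_two.mp hlen
      have hx2 : 2 ≤ x := (hmem x (by simp [hxy])).1
      have hxp : Nat.Prime x.toNat := (hmem x (by simp [hxy])).2
      have hyp : Nat.Prime y.toNat := (hmem y (by simp [hxy])).2
      have hxy' : x ≠ y := by
        rw [hxy] at hne
        simp [PySem.List.pyGet?, PySem.List.pyIdx?] at hne
        exact hne
      have hxley : x ≤ y := by
        rw [hxy] at hpair
        simp only [List.pairwise_cons, List.mem_singleton] at hpair
        exact hpair.1 y rfl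
      have hprodxy : x * y = n := by
        rw [hxy] at hprod
        simpa using hprod
      have hndx : n / x = y := by
        rw [← hprodxy]
        exact Int.mul_ediv_cancel_left y (by omega)
      refine hex x ⟨hx2, by nlinarith [lt_of_le_of_ne hxley hxy', hx2, hprodxy], ⟨y, hprodxy.symm⟩, hxp, by rw [hndx]; exact hyp⟩
  · -- n ≤ 1: A's loop never runs, B's factor list is empty (or a single factor for n ≤ 4)
    have hA : kdel n = [0] := by
      rw [kdel, kdelGo_eq, if_neg (by omega : ¬ (2:Int) * 2 < n)]
    have hB : facGo n 2 = [] := by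
      rw [facGo, if_neg (by omega : ¬ (2:Int) ≤ 1), if_neg (by omega : ¬ (2:Int) * 2 ≤ n),
        if_neg (by omega : ¬ (1:Int) < n)]
    rw [hA, kdel_alt]
    simp [hB]
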